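-- pv_equiv track=rewrite | github.com/mivanich/floating_point_arithmetic | src/main.py | pretty_print
-- ===== SOURCE A (Python) =====
-- def pretty_print(str_value):
--     HEX_PREFIX = "0x"
--     if str_value.startswith("0b"):
--         binary_len = len(str_value) - len("0b")
--         last_part_len = binary_len % 4
--         out_str = "0b" + str_value[len("0b"):last_part_len + len("0b")]
--         if last_part_len != 0:
--             out_str += "_"
--         for i in range(last_part_len + len("0b"), len(str_value), 4):
--             out_str += str_value[i] + str_value[i + 1] + str_value[i + 2] + str_value[i + 3]
--             if i + 4 < len(str_value):
--                 out_str += "_"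
--         return out_str
--     elif str_value.startswith(HEX_PREFIX):
--         if str_value.startswith(HEX_PREFIX):
--             binary_len = len(str_value) - len(HEX_PREFIX)
--             last_part_len = binary_len % 2
--             out_str = HEX_PREFIX + str_value[len(HEX_PREFIX):last_part_len + len(HEX_PREFIX)]
--             if last_part_len != 0:
--                 out_str += "_"
--             for i in range(last_part_len + len(HEX_PREFIX), len(str_value), 2):
--                 out_str += str_value[i] + str_value[i + 1]
--                 if i + 2 < len(str_value):
--                     out_str += "_"
--             return out_str
--     return str_value
-- ===== SOURCE B (Python) =====
-- def pretty_print(str_value):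
--     if str_value.startswith("0b"):
--         prefix, group = "0b", 4
--     elif str_value.startswith("0x"):
--         prefix, group = "0x", 2
--     else:
--         return str_value
--     rev = str_value[2:][::-1]
--     chunks = [rev[i:i + group][::-1] for i in range(0, len(rev), group)]
--     return prefix + "_".join(reversed(chunks))
-- ===== Notes on version B (the rewrite author's own statement) =====
-- stated objective: simpler
-- what changed: B strips the prefix, chunks the reversed digit string into fixed-size groups so the leading partial group emerges from right-to-left slicing, and joins the chunks with '_', replacing A's len%group remainder precomputation and character-by-character index loop with trailing-underscore bookkeeping.
-- intended difference: On prefixed inputs whose digit part is shorter than one full group ('0b' with 1-3 digits, '0x' with 1 digit) A returns the string with a spurious trailing underscore (e.g. '0b101' -> '0b101_'), while B returns it with no separator, which is the intended grouping. — e.g. on pretty_print("0b1"): A returns "0b1_", B returns "0b1"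
import Mathlib
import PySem

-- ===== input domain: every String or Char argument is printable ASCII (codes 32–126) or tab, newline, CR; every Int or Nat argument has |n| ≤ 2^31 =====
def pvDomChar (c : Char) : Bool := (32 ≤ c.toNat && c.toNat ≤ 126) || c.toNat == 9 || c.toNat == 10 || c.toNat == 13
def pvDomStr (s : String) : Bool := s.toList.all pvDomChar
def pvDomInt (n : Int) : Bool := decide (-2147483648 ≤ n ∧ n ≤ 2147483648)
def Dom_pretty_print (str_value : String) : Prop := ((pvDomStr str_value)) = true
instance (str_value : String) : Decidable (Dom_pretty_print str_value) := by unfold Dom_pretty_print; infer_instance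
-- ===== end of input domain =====

-- B chunks the reversed digit string into fixed-size groups and joins them with '_' (simpler
-- decomposition); on prefixed inputs with fewer digits than one group A returns a spurious
-- trailing '_' (D_ below) and B returns the intended ungrouped string.


-- ===== PORT A =====
def pretty_print (str_value : String) : String :=
  let s := str_value.toList
  if PySem.Chars.startswith s ['0', 'b'] then
    let binary_len : Int := PySem.Chars.len s - 2
    let last_part_len : Int := PySem.Int.mod binary_len 4
    let out_str := ['0', 'b'] ++ PySem.Chars.slice s (some 2) (some (last_part_len + 2))
    let out_str := if last_part_len ≠ 0 then out_str ++ ['_'] else out_str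
    String.ofList ((PySem.List.pyRange (last_part_len + 2) (PySem.Chars.len s) 4).foldl
      (fun out_str i =>
        if i + 4 < PySem.Chars.len s then
          out_str ++ [PySem.List.pyGetD s i ' ', PySem.List.pyGetD s (i + 1) ' ',
                      PySem.List.pyGetD s (i + 2) ' ', PySem.List.pyGetD s (i + 3) ' '] ++ ['_']
        else
          out_str ++ [PySem.List.pyGetD s i ' ', PySem.List.pyGetD s (i + 1) ' ',
                      PySem.List.pyGetD s (i + 2) ' ', PySem.List.pyGetD s (i + 3) ' ']) out_str)
  else if PySem.Chars.startswith s ['0', 'x'] then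
    if PySem.Chars.startswith s ['0', 'x'] then
      let binary_len : Int := PySem.Chars.len s - 2
      let last_part_len : Int := PySem.Int.mod binary_len 2
      let out_str := ['0', 'x'] ++ PySem.Chars.slice s (some 2) (some (last_part_len + 2))
      let out_str := if last_part_len ≠ 0 then out_str ++ ['_'] else out_str
      String.ofList ((PySem.List.pyRange (last_part_len + 2) (PySem.Chars.len s) 2).foldl
        (fun out_str i =>
          if i + 2 < PySem.Chars.len s then
            out_str ++ [PySem.List.pyGetD s i ' ', PySem.List.pyGetD s (i + 1) ' '] ++ ['_']
          else
            out_str ++ [PySem.List.pyGetD s i ' ', PySem.List.pyGetD s (i + 1) ' ']) out_str)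
    else str_value
  else str_value

-- ===== PORT B =====
-- B-side helper: group the digits (everything after the 2-char prefix) from the right.
-- '[::-1]' is ported as List.reverse (exact: PySem.List.slice?_none_none_neg_one).
def pvGroupB (s pre : List Char) (group : Nat) : String :=
  let rev := (PySem.List.slice s (some 2) none).reverse
  let chunks := (PySem.List.pyRange 0 (PySem.Chars.len rev) (group : Int)).map
      (fun i => (PySem.List.slice rev (some i) (some (i + (group : Int)))).reverse)
  String.ofList (pre ++ PySem.Chars.join ['_'] chunks.reverse)

def pretty_print_alt (str_value : String) : String :=
  let s := str_value.toList
  if PySem.Chars.startswith s ['0', 'b'] then pvGroupB s ['0', 'b'] 4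
  else if PySem.Chars.startswith s ['0', 'x'] then pvGroupB s ['0', 'x'] 2
  else str_value

-- ===== PRECONDITION & SPEC =====
-- On prefixed inputs whose digit part is shorter than one full group ('0b' with 1-3 digits,
-- '0x' with 1 digit) A returns a spurious trailing underscore ('0b101' -> '0b101_'); B returns
-- the string without any separator, which is the intended grouping.
def D_pretty_print (str_value : String) : Prop :=
  (PySem.Chars.startswith str_value.toList ['0', 'b'] = true ∧
    3 ≤ str_value.toList.length ∧ str_value.toList.length ≤ 5) ∨
  (PySem.Chars.startswith str_value.toList ['0', 'b'] = false ∧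
    PySem.Chars.startswith str_value.toList ['0', 'x'] = true ∧ str_value.toList.length = 3)
instance (str_value : String) : Decidable (D_pretty_print str_value) := by
  unfold D_pretty_print; infer_instance

def Spec_pretty_print (str_value : String) (out : String) : Prop :=
  ¬ D_pretty_print str_value → out = pretty_print_alt str_value
instance (str_value : String) (out : String) : Decidable (Spec_pretty_print str_value out) := by
  unfold Spec_pretty_print; infer_instance

def pvDiffWitness_pretty_print : String := "0b1"
def pvDiffWitnessOut_pretty_print : String × String := ("0b1_", "0b1")

-- ===== CLAIM (what is proved, stated in full; the proofs are below) =====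
def Claim_unchanged_pretty_print : Prop := ∀ (str_value : String), Dom_pretty_print str_value → Spec_pretty_print str_value (pretty_print str_value)
def Claim_changed_pretty_print : Prop := Dom_pretty_print (pvDiffWitness_pretty_print) ∧ D_pretty_print (pvDiffWitness_pretty_print) ∧ pretty_print (pvDiffWitness_pretty_print) = pvDiffWitnessOut_pretty_print.1 ∧ pretty_print_alt (pvDiffWitness_pretty_print) = pvDiffWitnessOut_pretty_print.2 ∧ pvDiffWitnessOut_pretty_print.1 ≠ pvDiffWitnessOut_pretty_print.2
def Claim_exact_pretty_print : Prop := ∀ (str_value : String), Dom_pretty_print str_value → D_pretty_print str_value → pretty_print str_value ≠ pretty_print_alt str_value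

-- ===== LEMMAS AND PROOFS =====
def chunksL (g : Nat) (l : List Char) : List (List Char) :=
  if _h : l = [] ∨ g = 0 then [] else l.take g :: chunksL g (l.drop g)
termination_by l.length
decreasing_by
  push Not at _h
  have h1 : 0 < l.length := List.length_pos_of_ne_nil _h.1
  simp only [List.length_drop]
  omega

theorem chunksL_nil (g : Nat) : chunksL g [] = [] := by rw [chunksL]; simp

theorem chunksL_cons (g : Nat) (l : List Char) (hl : l ≠ []) (hg : g ≠ 0) :
    chunksL g l = l.take g :: chunksL g (l.drop g) := by
  rw [chunksL]; simp [hl, hg]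

theorem chunksL_append (g : Nat) (hg : 0 < g) (l₁ l₂ : List Char) (hd : g ∣ l₁.length) :
    chunksL g (l₁ ++ l₂) = chunksL g l₁ ++ chunksL g l₂ := by
  induction hn : l₁.length using Nat.strong_induction_on generalizing l₁ with
  | _ n ih =>
  by_cases h0 : l₁ = []
  · subst h0; simp [chunksL_nil]
  · have hlen : 0 < l₁.length := List.length_pos_of_ne_nil h0
    have hge : g ≤ l₁.length := Nat.le_of_dvd hlen hd
    rw [chunksL_cons g l₁ h0 (by omega), chunksL_cons g (l₁ ++ l₂) (by simp [h0]) (by omega)]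
    rw [List.take_append_of_le_length hge, List.drop_append_of_le_length hge]
    rw [ih (l₁.drop g).length (by simp; omega) (l₁.drop g) (by simp only [List.length_drop]; exact Nat.dvd_sub hd dvd_rfl) rfl]
    simp

theorem chunksL_small (g : Nat) (l : List Char) (hl : l ≠ []) (hg : g ≠ 0)
    (hlen : l.length ≤ g) : chunksL g l = [l] := by
  rw [chunksL_cons g l hl hg, List.take_of_length_le hlen, List.drop_eq_nil_of_le hlen, chunksL_nil]

theorem revchunks (g : Nat) (hg : 0 < g) (l : List Char) :
    ((chunksL g l.reverse).map List.reverse).reverse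
      = if l.length % g = 0 then chunksL g l
        else l.take (l.length % g) :: chunksL g (l.drop (l.length % g)) := by
  induction hn : l.length using Nat.strong_induction_on generalizing l with
  | _ n ih =>
  subst hn
  by_cases h0 : l = []
  · subst h0; simp [chunksL_nil]
  by_cases hsm : l.length ≤ g
  · have hrl : l.reverse ≠ [] := by simp [h0]
    have hl0 : 0 < l.length := List.length_pos_of_ne_nil h0
    rw [chunksL_small g l.reverse hrl (by omega) (by simp [hsm])]
    simp only [List.map_cons, List.map_nil, List.reverse_reverse, List.reverse_cons,
      List.reverse_nil, List.nil_append]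
    by_cases heq : l.length % g = 0
    · have hlg : l.length = g := by
        rcases Nat.dvd_of_mod_eq_zero heq with ⟨k, hk⟩
        rcases k with _ | k
        · omega
        · have : g ≤ g * (k + 1) := Nat.le_mul_of_pos_right g (by omega)
          omega
      rw [if_pos heq, chunksL_small g l h0 (by omega) (by omega)]
    · rw [if_neg heq]
      have hne : l.length ≠ g := fun hc => heq (by rw [hc]; exact Nat.mod_self g)
      have hmm : l.length % g = l.length := Nat.mod_eq_of_lt (lt_of_le_of_ne hsm hne)
      rw [hmm, List.take_length, List.drop_length, chunksL_nil]
  · -- l.length > g : peel the last g characters t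
    push Not at hsm
    set t := l.drop (l.length - g) with ht
    set l' := l.take (l.length - g) with hl'
    have hlt : l = l' ++ t := (List.take_append_drop _ l).symm
    have htl : t.length = g := by rw [ht, List.length_drop]; omega
    have hl'len : l'.length = l.length - g := by rw [hl', List.length_take]; omega
    have hrev : l.reverse = t.reverse ++ l'.reverse := by rw [hlt, List.reverse_append]
    have htne : t ≠ [] := by intro hc; rw [hc] at htl; simp at htl; omega
    have htrl : t.reverse.length = g := by simp [htl]
    have hchunk : chunksL g l.reverse = t.reverse :: chunksL g l'.reverse := by
      rw [hrev, chunksL_cons g _ (by simp [htne]) (by omega)]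
      rw [List.take_left' htrl, List.drop_left' htrl]
    rw [hchunk]
    simp only [List.map_cons, List.reverse_cons, List.reverse_reverse]
    rw [ih l'.length (by omega) l' rfl]
    have hmod : l.length % g = l'.length % g := by
      rw [hl'len]
      conv_lhs => rw [show l.length = (l.length - g) + g by omega]
      rw [Nat.add_mod_right]
    have hgle : t.length ≤ g := by omega
    have hg0 : g ≠ 0 := by omega
    by_cases heq : l.length % g = 0
    · rw [if_pos heq, if_pos (hmod ▸ heq)]
      have hfin : chunksL g l = chunksL g l' ++ [t] := by
        conv_lhs => rw [hlt]
        rw [chunksL_append g hg l' t (Nat.dvd_of_mod_eq_zero (hmod ▸ heq)),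
          chunksL_small g t htne hg0 hgle]
      rw [hfin]
    · rw [if_neg heq, if_neg (fun hc => heq (hmod ▸ hc))]
      have hr : l.length % g < g := Nat.mod_lt _ hg
      have hrle : l.length % g ≤ l'.length := by
        rw [hmod]; exact Nat.mod_le _ _
      simp only [List.cons_append]
      congr 1
      · conv_lhs => rw [hl', List.take_take]
        have hmin : min (l'.length % g) (l.length - g) = l'.length % g :=
          Nat.min_eq_left (by rw [← hl'len]; exact Nat.mod_le _ _)
        rw [hmin, ← hmod]
      · have hdrop : l.drop (l.length % g) = l'.drop (l.length % g) ++ t := by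
          conv_lhs => rw [show l.drop (l.length % g) = (l' ++ t).drop (l.length % g) from by rw [← hlt]]
          rw [List.drop_append_of_le_length hrle]
        rw [hdrop, hmod]
        have hdvd2 : g ∣ (l'.drop (l'.length % g)).length := by
          simp only [List.length_drop]
          exact Nat.dvd_sub_mod _
        rw [chunksL_append g hg _ t hdvd2, chunksL_small g t htne hg0 hgle]

theorem pyRange_pos_cons (a b st : Int) (hs : 0 < st) (hab : a < b) :
    PySem.List.pyRange a b st = a :: PySem.List.pyRange (a + st) b st := by
  rw [PySem.List.pyRange_of_pos a b hs, PySem.List.pyRange_of_pos (a + st) b hs]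
  set x : Int := b - (a + st) + st - 1 with hx
  have h1 : b - a + st - 1 = x + 1 * st := by ring
  have h2 : (x + 1 * st) / st = x / st + 1 := Int.add_mul_ediv_right _ _ (by omega)
  by_cases h3 : a + st < b
  · have hx0 : 0 ≤ x := by omega
    have hq0 : 0 ≤ x / st := Int.ediv_nonneg hx0 (by omega)
    rw [if_pos hab, if_pos h3, h1, h2]
    have h4 : (x / st + 1).toNat = (x / st).toNat + 1 := by omega
    rw [h4, List.range_succ_eq_map, List.map_cons]
    simp only [Nat.cast_zero, mul_zero, add_zero, List.map_map]
    congr 1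
    apply List.map_congr_left
    intro k _
    simp [Function.comp]
    ring
  · have hlt : x < st := by omega
    have hx0 : 0 ≤ x := by omega
    have h5 : x / st = 0 := Int.ediv_eq_zero_of_lt hx0 hlt
    rw [if_pos hab, if_neg h3, h1, h2, h5]
    simp

theorem pyRange_pos_nil (a b st : Int) (hs : 0 < st) (hab : b ≤ a) :
    PySem.List.pyRange a b st = [] := by
  rw [PySem.List.pyRange_of_pos a b hs]
  simp [not_lt.mpr hab]

theorem mapSlices (g : Nat) (hg : 0 < g) (rev : List Char) (i : Nat) :
    (PySem.List.pyRange (i : Int) (rev.length : Int) (g : Int)).map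
      (fun j => (PySem.List.slice rev (some j) (some (j + (g : Int)))).reverse)
    = (chunksL g (rev.drop i)).map List.reverse := by
  induction hn : rev.length - i using Nat.strong_induction_on generalizing i with
  | _ n ih =>
  subst hn
  by_cases hlt : i < rev.length
  · rw [pyRange_pos_cons _ _ _ (by exact_mod_cast hg) (by exact_mod_cast hlt), List.map_cons]
    have hcast : (i : Int) + (g : Int) = ((i + g : Nat) : Int) := by push_cast; ring
    rw [hcast, PySem.List.slice_natCast rev i (i + g), show i + g - i = g from by omega]
    have htail := ih (rev.length - (i + g)) (by omega) (i + g) rfl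
    rw [htail]
    have hdne : rev.drop i ≠ [] := by
      intro hc
      have := congrArg List.length hc
      simp at this
      omega
    rw [chunksL_cons g (rev.drop i) hdne (by omega), List.map_cons, List.drop_drop]
  · rw [pyRange_pos_nil _ _ _ (by exact_mod_cast hg) (by exact_mod_cast (by omega : rev.length ≤ i))]
    rw [List.drop_eq_nil_of_le (by omega), chunksL_nil]
    simp

theorem chunksL_ne_nil (g : Nat) (l : List Char) (hl : l ≠ []) (hg : g ≠ 0) :
    chunksL g l ≠ [] := by
  rw [chunksL_cons g l hl hg]; simp

theorem take_drop_four (s : List Char) (i : Nat) (h : i + 4 ≤ s.length) :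
    (s.drop i).take 4 = [s.getD i ' ', s.getD (i + 1) ' ', s.getD (i + 2) ' ', s.getD (i + 3) ' '] := by
  apply List.ext_getElem
  · simp; omega
  · intro k hk1 hk2
    simp only [List.length_take, List.length_drop] at hk1
    have hk : k < 4 := by omega
    simp only [List.getElem_take, List.getElem_drop]
    interval_cases k <;>
      simp [List.getD_eq_getElem?_getD, (by omega : i < s.length),
        (by omega : i+1 < s.length), (by omega : i+2 < s.length), (by omega : i+3 < s.length)]

theorem take_drop_two (s : List Char) (i : Nat) (h : i + 2 ≤ s.length) :
    (s.drop i).take 2 = [s.getD i ' ', s.getD (i + 1) ' '] := by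
  apply List.ext_getElem
  · simp; omega
  · intro k hk1 hk2
    simp only [List.length_take, List.length_drop] at hk1
    have hk : k < 2 := by omega
    simp only [List.getElem_take, List.getElem_drop]
    interval_cases k <;>
      simp [List.getD_eq_getElem?_getD, (by omega : i < s.length), (by omega : i+1 < s.length)]

theorem foldA4 (s : List Char) (i : Nat) (hle : i ≤ s.length) (hdvd : 4 ∣ (s.length - i))
    (acc : List Char) :
    (PySem.List.pyRange (i : Int) (s.length : Int) 4).foldl
      (fun out_str j =>
        if j + 4 < (s.length : Int) then
          out_str ++ [PySem.List.pyGetD s j ' ', PySem.List.pyGetD s (j + 1) ' ',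
                      PySem.List.pyGetD s (j + 2) ' ', PySem.List.pyGetD s (j + 3) ' '] ++ ['_']
        else
          out_str ++ [PySem.List.pyGetD s j ' ', PySem.List.pyGetD s (j + 1) ' ',
                      PySem.List.pyGetD s (j + 2) ' ', PySem.List.pyGetD s (j + 3) ' ']) acc
    = acc ++ PySem.Chars.join ['_'] (chunksL 4 (s.drop i)) := by
  induction hn : s.length - i using Nat.strong_induction_on generalizing i acc with
  | _ n ih =>
  subst hn
  by_cases hlt : i < s.length
  · have h4 : i + 4 ≤ s.length := by omega
    rw [pyRange_pos_cons _ _ _ (by norm_num) (by exact_mod_cast hlt), List.foldl_cons]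
    have hc1 : ((i : Int) + 1) = ((i + 1 : Nat) : Int) := by push_cast; ring
    have hc2 : ((i : Int) + 2) = ((i + 2 : Nat) : Int) := by push_cast; ring
    have hc3 : ((i : Int) + 3) = ((i + 3 : Nat) : Int) := by push_cast; ring
    have hc4 : ((i : Int) + 4) = ((i + 4 : Nat) : Int) := by push_cast; ring
    simp only [hc1, hc2, hc3, hc4, PySem.List.pyGetD_natCast]
    have hchunk := take_drop_four s i h4
    have hdne : s.drop i ≠ [] := by
      intro hc; have := congrArg List.length hc; simp at this; omega
    rw [chunksL_cons 4 (s.drop i) hdne (by omega)]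
    by_cases hmore : i + 4 < s.length
    · rw [if_pos (by exact_mod_cast hmore)]
      rw [ih (s.length - (i + 4)) (by omega) (i + 4) (by omega) (by omega : 4 ∣ (s.length - (i+4))) _ rfl]
      have hdne2 : s.drop (i + 4) ≠ [] := by
        intro hc; have := congrArg List.length hc; simp at this; omega
      obtain ⟨c, rest, hcr⟩ : ∃ c rest, chunksL 4 (s.drop (i + 4)) = c :: rest := by
        rcases h : chunksL 4 (s.drop (i + 4)) with _ | ⟨c, rest⟩
        · exact absurd h (chunksL_ne_nil 4 _ hdne2 (by omega))
        · exact ⟨c, rest, rfl⟩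
      rw [List.drop_drop, hcr, PySem.Chars.join_cons_cons, ← hchunk]
      simp [List.append_assoc]
    · have hi4 : i + 4 = s.length := by
        rcases hdvd with ⟨k, hk⟩
        omega
      rw [if_neg (by exact_mod_cast hmore)]
      rw [pyRange_pos_nil _ _ _ (by norm_num) (by exact_mod_cast (by omega : s.length ≤ i + 4))]
      rw [List.drop_drop, hi4, List.drop_length, chunksL_nil,
        PySem.Chars.join_singleton, ← hchunk]
      simp
  · have hieq : i = s.length := by omega
    rw [pyRange_pos_nil _ _ _ (by norm_num) (by exact_mod_cast (by omega : s.length ≤ i))]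
    rw [hieq, List.drop_length, chunksL_nil]
    simp [PySem.Chars.join_nil]

theorem foldA2 (s : List Char) (i : Nat) (hle : i ≤ s.length) (hdvd : 2 ∣ (s.length - i))
    (acc : List Char) :
    (PySem.List.pyRange (i : Int) (s.length : Int) 2).foldl
      (fun out_str j =>
        if j + 2 < (s.length : Int) then
          out_str ++ [PySem.List.pyGetD s j ' ', PySem.List.pyGetD s (j + 1) ' '] ++ ['_']
        else
          out_str ++ [PySem.List.pyGetD s j ' ', PySem.List.pyGetD s (j + 1) ' ']) acc
    = acc ++ PySem.Chars.join ['_'] (chunksL 2 (s.drop i)) := by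
  induction hn : s.length - i using Nat.strong_induction_on generalizing i acc with
  | _ n ih =>
  subst hn
  by_cases hlt : i < s.length
  · have h2 : i + 2 ≤ s.length := by omega
    rw [pyRange_pos_cons _ _ _ (by norm_num) (by exact_mod_cast hlt), List.foldl_cons]
    have hc1 : ((i : Int) + 1) = ((i + 1 : Nat) : Int) := by push_cast; ring
    have hc2 : ((i : Int) + 2) = ((i + 2 : Nat) : Int) := by push_cast; ring
    simp only [hc1, hc2, PySem.List.pyGetD_natCast]
    have hchunk := take_drop_two s i h2
    have hdne : s.drop i ≠ [] := by
      intro hc; have := congrArg List.length hc; simp at this; omega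
    rw [chunksL_cons 2 (s.drop i) hdne (by omega)]
    by_cases hmore : i + 2 < s.length
    · rw [if_pos (by exact_mod_cast hmore)]
      rw [ih (s.length - (i + 2)) (by omega) (i + 2) (by omega) (by omega : 2 ∣ (s.length - (i+2))) _ rfl]
      have hdne2 : s.drop (i + 2) ≠ [] := by
        intro hc; have := congrArg List.length hc; simp at this; omega
      obtain ⟨c, rest, hcr⟩ : ∃ c rest, chunksL 2 (s.drop (i + 2)) = c :: rest := by
        rcases h : chunksL 2 (s.drop (i + 2)) with _ | ⟨c, rest⟩
        · exact absurd h (chunksL_ne_nil 2 _ hdne2 (by omega))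
        · exact ⟨c, rest, rfl⟩
      rw [List.drop_drop, hcr, PySem.Chars.join_cons_cons, ← hchunk]
      simp [List.append_assoc]
    · have hi2 : i + 2 = s.length := by
        rcases hdvd with ⟨k, hk⟩
        omega
      rw [if_neg (by exact_mod_cast hmore)]
      rw [pyRange_pos_nil _ _ _ (by norm_num) (by exact_mod_cast (by omega : s.length ≤ i + 2))]
      rw [List.drop_drop, hi2, List.drop_length, chunksL_nil,
        PySem.Chars.join_singleton, ← hchunk]
      simp
  · have hieq : i = s.length := by omega
    rw [pyRange_pos_nil _ _ _ (by norm_num) (by exact_mod_cast (by omega : s.length ≤ i))]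
    rw [hieq, List.drop_length, chunksL_nil]
    simp [PySem.Chars.join_nil]

theorem sides_eq (g : Nat) (hg : 0 < g) (digits : List Char)
    (hnd : digits.length % g = 0 ∨ g ≤ digits.length) :
    (digits.take (digits.length % g) ++ (if digits.length % g ≠ 0 then ['_'] else []))
      ++ PySem.Chars.join ['_'] (chunksL g (digits.drop (digits.length % g)))
    = PySem.Chars.join ['_'] (((chunksL g digits.reverse).map List.reverse).reverse) := by
  rw [revchunks g hg digits]
  by_cases heq : digits.length % g = 0
  · rw [if_pos heq, heq]
    simp
  · rw [if_neg heq, if_pos (by simp [heq] : digits.length % g ≠ 0)]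
    have hglen : g ≤ digits.length := by
      rcases hnd with h | h
      · exact absurd h heq
      · exact h
    have hr : digits.length % g < g := Nat.mod_lt _ hg
    have hdne : digits.drop (digits.length % g) ≠ [] := by
      intro hc; have := congrArg List.length hc; simp at this; omega
    obtain ⟨c, rest, hcr⟩ : ∃ c rest, chunksL g (digits.drop (digits.length % g)) = c :: rest := by
      rcases h : chunksL g (digits.drop (digits.length % g)) with _ | ⟨c, rest⟩
      · exact absurd h (chunksL_ne_nil g _ hdne (by omega))
      · exact ⟨c, rest, rfl⟩
    rw [hcr, PySem.Chars.join_cons_cons]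

theorem main_eq_0b (str : String) (digits : List Char)
    (hsd : str.toList = ['0','b'] ++ digits)
    (hnd : digits.length % 4 = 0 ∨ 4 ≤ digits.length) :
    pretty_print str = pretty_print_alt str := by
  have hb' : PySem.Chars.startswith (['0','b'] ++ digits) ['0','b'] = true :=
    (PySem.Chars.startswith_iff _ _).mpr (List.prefix_append _ _)
  unfold pretty_print pretty_print_alt pvGroupB
  simp only [hsd, hb', if_true, PySem.Chars.len_eq, PySem.Chars.slice_eq_listSlice,
    List.length_append, List.length_cons, List.length_nil]
  simp only [show (0:Nat)+1+1+digits.length = digits.length+2 from by omega]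
  have hcast1 : ((↑(digits.length+2) : Int) - 2) = ((digits.length:Nat):Int) := by push_cast; ring
  have hmod : PySem.Int.mod ((digits.length:Nat):Int) 4 = ((digits.length % 4 : Nat) : Int) := by
    exact_mod_cast PySem.Int.mod_natCast digits.length 4
  have hr2 : ((digits.length%4 : Nat):Int) + 2 = ((digits.length%4+2 : Nat):Int) := by push_cast; ring
  simp only [hcast1, hmod, hr2]
  have hdrop2 : (['0','b'] ++ digits).drop 2 = digits := rfl
  have hsliceA : PySem.List.slice (['0','b'] ++ digits) (some 2) (some ((digits.length%4+2 : Nat):Int))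
      = digits.take (digits.length%4) := by
    rw [show (2:Int) = ((2:Nat):Int) from rfl, PySem.List.slice_natCast, hdrop2,
      show digits.length%4+2-2 = digits.length%4 from by omega]
  have hsliceB : PySem.List.slice (['0','b'] ++ digits) (some 2) none = digits := by
    rw [show (2:Int) = ((2:Nat):Int) from rfl, PySem.List.slice_from_natCast]
    exact hdrop2
  simp only [hsliceA, hsliceB]
  have hfold := foldA4 (['0','b'] ++ digits) (digits.length%4+2)
    (by simp; omega) (by simp; omega)
  simp only [List.length_append, List.length_cons, List.length_nil,
    show (0:Nat)+1+1+digits.length = digits.length+2 from by omega] at hfold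
  rw [hfold]
  have hmap := mapSlices 4 (by norm_num) digits.reverse 0
  simp only [Nat.cast_zero, List.drop_zero] at hmap
  rw [hmap]
  rw [← sides_eq 4 (by norm_num) digits hnd]
  have hdropr : ∀ k, (['0','b'] ++ digits).drop (k+2) = digits.drop k := by
    intro k
    conv_rhs => rw [← hdrop2]
    rw [List.drop_drop]
    congr 1
    omega
  rw [hdropr]
  simp only [ne_eq, Nat.cast_eq_zero]
  split_ifs with h
  · simp
  · simp

theorem main_eq_0x (str : String) (digits : List Char)
    (hsd : str.toList = ['0','x'] ++ digits)
    (hbf : PySem.Chars.startswith str.toList ['0','b'] = false)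
    (hnd : digits.length % 2 = 0 ∨ 2 ≤ digits.length) :
    pretty_print str = pretty_print_alt str := by
  have hx' : PySem.Chars.startswith (['0','x'] ++ digits) ['0','x'] = true :=
    (PySem.Chars.startswith_iff _ _).mpr (List.prefix_append _ _)
  have hb'' : PySem.Chars.startswith (['0','x'] ++ digits) ['0','b'] = false := hsd ▸ hbf
  unfold pretty_print pretty_print_alt pvGroupB
  simp only [hsd, hb'', hx', if_true, Bool.false_eq_true, if_false, PySem.Chars.len_eq,
    PySem.Chars.slice_eq_listSlice, List.length_append, List.length_cons, List.length_nil]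
  simp only [show (0:Nat)+1+1+digits.length = digits.length+2 from by omega]
  have hcast1 : ((↑(digits.length+2) : Int) - 2) = ((digits.length:Nat):Int) := by push_cast; ring
  have hmod : PySem.Int.mod ((digits.length:Nat):Int) 2 = ((digits.length % 2 : Nat) : Int) := by
    exact_mod_cast PySem.Int.mod_natCast digits.length 2
  have hr2 : ((digits.length%2 : Nat):Int) + 2 = ((digits.length%2+2 : Nat):Int) := by push_cast; ring
  simp only [hcast1, hmod, hr2]
  have hdrop2 : (['0','x'] ++ digits).drop 2 = digits := rfl
  have hsliceA : PySem.List.slice (['0','x'] ++ digits) (some 2) (some ((digits.length%2+2 : Nat):Int))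
      = digits.take (digits.length%2) := by
    rw [show (2:Int) = ((2:Nat):Int) from rfl, PySem.List.slice_natCast, hdrop2,
      show digits.length%2+2-2 = digits.length%2 from by omega]
  have hsliceB : PySem.List.slice (['0','x'] ++ digits) (some 2) none = digits := by
    rw [show (2:Int) = ((2:Nat):Int) from rfl, PySem.List.slice_from_natCast]
    exact hdrop2
  simp only [hsliceA, hsliceB]
  have hfold := foldA2 (['0','x'] ++ digits) (digits.length%2+2)
    (by simp; omega) (by simp; omega)
  simp only [List.length_append, List.length_cons, List.length_nil,
    show (0:Nat)+1+1+digits.length = digits.length+2 from by omega] at hfold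
  rw [hfold]
  have hmap := mapSlices 2 (by norm_num) digits.reverse 0
  simp only [Nat.cast_zero, List.drop_zero] at hmap
  rw [hmap]
  rw [← sides_eq 2 (by norm_num) digits hnd]
  have hdropr : ∀ k, (['0','x'] ++ digits).drop (k+2) = digits.drop k := by
    intro k
    conv_rhs => rw [← hdrop2]
    rw [List.drop_drop]
    congr 1
    omega
  rw [hdropr]
  simp only [ne_eq, Nat.cast_eq_zero]
  split_ifs with h
  · simp
  · simp

-- ===== VERDICT (by name: the statement is the Claim_ definition above) =====
theorem pretty_print_spec : Claim_unchanged_pretty_print := by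
  intro str _ hnd
  by_cases hb : PySem.Chars.startswith str.toList ['0','b'] = true
  · obtain ⟨digits, hdig⟩ := (PySem.Chars.startswith_iff _ _).mp hb
    have hsd : str.toList = ['0','b'] ++ digits := hdig.symm
    apply main_eq_0b str digits hsd
    unfold D_pretty_print at hnd
    have hlen : str.toList.length = digits.length + 2 := by rw [hsd]; simp
    by_cases hsmall : 3 ≤ str.toList.length ∧ str.toList.length ≤ 5
    · exact absurd (Or.inl ⟨hb, hsmall.1, hsmall.2⟩) hnd
    · have : digits.length = 0 ∨ 4 ≤ digits.length := by omega
      rcases this with h | h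
      · left; omega
      · right; exact h
  · by_cases hx : PySem.Chars.startswith str.toList ['0','x'] = true
    · obtain ⟨digits, hdig⟩ := (PySem.Chars.startswith_iff _ _).mp hx
      have hsd : str.toList = ['0','x'] ++ digits := hdig.symm
      have hbf : PySem.Chars.startswith str.toList ['0','b'] = false :=
        (Bool.not_eq_true _).mp hb
      apply main_eq_0x str digits hsd hbf
      unfold D_pretty_print at hnd
      have hlen : str.toList.length = digits.length + 2 := by rw [hsd]; simp
      by_cases hone : str.toList.length = 3
      · exact absurd (Or.inr ⟨hbf, hx, hone⟩) hnd
      · have : digits.length = 0 ∨ 2 ≤ digits.length := by omega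
        rcases this with h | h
        · left; omega
        · right; exact h
    · unfold pretty_print pretty_print_alt
      simp only [(Bool.not_eq_true _).mp hb, (Bool.not_eq_true _).mp hx,
        Bool.false_eq_true, if_false]

theorem pretty_print_changed : Claim_changed_pretty_print := by
  unfold Claim_changed_pretty_print; decide

theorem tight_0b (str : String) (digits : List Char)
    (hsd : str.toList = ['0','b'] ++ digits)
    (h1 : 1 ≤ digits.length) (h2 : digits.length ≤ 3) :
    pretty_print str ≠ pretty_print_alt str := by
  have hb' : PySem.Chars.startswith (['0','b'] ++ digits) ['0','b'] = true :=
    (PySem.Chars.startswith_iff _ _).mpr (List.prefix_append _ _)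
  unfold pretty_print pretty_print_alt pvGroupB
  simp only [hsd, hb', if_true, PySem.Chars.len_eq, PySem.Chars.slice_eq_listSlice,
    List.length_append, List.length_cons, List.length_nil]
  simp only [show (0:Nat)+1+1+digits.length = digits.length+2 from by omega]
  have hcast1 : ((↑(digits.length+2) : Int) - 2) = ((digits.length:Nat):Int) := by push_cast; ring
  have hmod : PySem.Int.mod ((digits.length:Nat):Int) 4 = ((digits.length % 4 : Nat) : Int) := by
    exact_mod_cast PySem.Int.mod_natCast digits.length 4
  have hr2 : ((digits.length%4 : Nat):Int) + 2 = ((digits.length%4+2 : Nat):Int) := by push_cast; ring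
  simp only [hcast1, hmod, hr2]
  have hdrop2 : (['0','b'] ++ digits).drop 2 = digits := rfl
  have hsliceA : PySem.List.slice (['0','b'] ++ digits) (some 2) (some ((digits.length%4+2 : Nat):Int))
      = digits.take (digits.length%4) := by
    rw [show (2:Int) = ((2:Nat):Int) from rfl, PySem.List.slice_natCast, hdrop2,
      show digits.length%4+2-2 = digits.length%4 from by omega]
  have hsliceB : PySem.List.slice (['0','b'] ++ digits) (some 2) none = digits := by
    rw [show (2:Int) = ((2:Nat):Int) from rfl, PySem.List.slice_from_natCast]
    exact hdrop2
  simp only [hsliceA, hsliceB]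
  have hfold := foldA4 (['0','b'] ++ digits) (digits.length%4+2)
    (by simp; omega) (by simp; omega)
  simp only [List.length_append, List.length_cons, List.length_nil,
    show (0:Nat)+1+1+digits.length = digits.length+2 from by omega] at hfold
  rw [hfold]
  have hmap := mapSlices 4 (by norm_num) digits.reverse 0
  simp only [Nat.cast_zero, List.drop_zero] at hmap
  rw [hmap]
  rw [revchunks 4 (by norm_num) digits]
  have hrr : digits.length % 4 = digits.length := Nat.mod_eq_of_lt (by omega)
  have hdropr : ∀ k, (['0','b'] ++ digits).drop (k+2) = digits.drop k := by
    intro k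
    conv_rhs => rw [← hdrop2]
    rw [List.drop_drop]
    congr 1
    omega
  rw [hdropr]
  simp only [hrr, List.drop_length, chunksL_nil, PySem.Chars.join_nil, List.append_nil,
    List.take_length]
  rw [if_neg (by omega : ¬ digits.length = 0), PySem.Chars.join_singleton,
    if_pos (show ((digits.length : Int)) ≠ 0 from by
      exact_mod_cast (by omega : digits.length ≠ 0))]
  intro hc
  have hlen := congrArg (fun t => t.toList.length) hc
  simp [String.toList_ofList] at hlen

theorem tight_0x (str : String) (digits : List Char)
    (hsd : str.toList = ['0','x'] ++ digits)
    (hbf : PySem.Chars.startswith str.toList ['0','b'] = false)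
    (h1 : digits.length = 1) :
    pretty_print str ≠ pretty_print_alt str := by
  have hx' : PySem.Chars.startswith (['0','x'] ++ digits) ['0','x'] = true :=
    (PySem.Chars.startswith_iff _ _).mpr (List.prefix_append _ _)
  have hb'' : PySem.Chars.startswith (['0','x'] ++ digits) ['0','b'] = false := hsd ▸ hbf
  unfold pretty_print pretty_print_alt pvGroupB
  simp only [hsd, hb'', hx', if_true, Bool.false_eq_true, if_false, PySem.Chars.len_eq,
    PySem.Chars.slice_eq_listSlice, List.length_append, List.length_cons, List.length_nil]
  simp only [show (0:Nat)+1+1+digits.length = digits.length+2 from by omega]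
  have hcast1 : ((↑(digits.length+2) : Int) - 2) = ((digits.length:Nat):Int) := by push_cast; ring
  have hmod : PySem.Int.mod ((digits.length:Nat):Int) 2 = ((digits.length % 2 : Nat) : Int) := by
    exact_mod_cast PySem.Int.mod_natCast digits.length 2
  have hr2 : ((digits.length%2 : Nat):Int) + 2 = ((digits.length%2+2 : Nat):Int) := by push_cast; ring
  simp only [hcast1, hmod, hr2]
  have hdrop2 : (['0','x'] ++ digits).drop 2 = digits := rfl
  have hsliceA : PySem.List.slice (['0','x'] ++ digits) (some 2) (some ((digits.length%2+2 : Nat):Int))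
      = digits.take (digits.length%2) := by
    rw [show (2:Int) = ((2:Nat):Int) from rfl, PySem.List.slice_natCast, hdrop2,
      show digits.length%2+2-2 = digits.length%2 from by omega]
  have hsliceB : PySem.List.slice (['0','x'] ++ digits) (some 2) none = digits := by
    rw [show (2:Int) = ((2:Nat):Int) from rfl, PySem.List.slice_from_natCast]
    exact hdrop2
  simp only [hsliceA, hsliceB]
  have hfold := foldA2 (['0','x'] ++ digits) (digits.length%2+2)
    (by simp; omega) (by simp; omega)
  simp only [List.length_append, List.length_cons, List.length_nil,
    show (0:Nat)+1+1+digits.length = digits.length+2 from by omega] at hfold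
  rw [hfold]
  have hmap := mapSlices 2 (by norm_num) digits.reverse 0
  simp only [Nat.cast_zero, List.drop_zero] at hmap
  rw [hmap]
  rw [revchunks 2 (by norm_num) digits]
  have hrr : digits.length % 2 = digits.length := Nat.mod_eq_of_lt (by omega)
  have hdropr : ∀ k, (['0','x'] ++ digits).drop (k+2) = digits.drop k := by
    intro k
    conv_rhs => rw [← hdrop2]
    rw [List.drop_drop]
    congr 1
    omega
  rw [hdropr]
  simp only [hrr, List.drop_length, chunksL_nil, PySem.Chars.join_nil, List.append_nil,
    List.take_length]
  rw [if_neg (by omega : ¬ digits.length = 0), PySem.Chars.join_singleton,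
    if_pos (show ((digits.length : Int)) ≠ 0 from by
      exact_mod_cast (by omega : digits.length ≠ 0))]
  intro hc
  have hlen := congrArg (fun t => t.toList.length) hc
  simp [String.toList_ofList] at hlen

theorem pretty_print_tight : Claim_exact_pretty_print := by
  intro str _ hd
  unfold D_pretty_print at hd
  rcases hd with ⟨hb, h1, h2⟩ | ⟨hbf, hx, h3⟩
  · obtain ⟨digits, hdig⟩ := (PySem.Chars.startswith_iff _ _).mp hb
    have hsd : str.toList = ['0','b'] ++ digits := hdig.symm
    have hlen : str.toList.length = digits.length + 2 := by rw [hsd]; simp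
    exact tight_0b str digits hsd (by omega) (by omega)
  · obtain ⟨digits, hdig⟩ := (PySem.Chars.startswith_iff _ _).mp hx
    have hsd : str.toList = ['0','x'] ++ digits := hdig.symm
    have hlen : str.toList.length = digits.length + 2 := by rw [hsd]; simp
    exact tight_0x str digits hsd hbf (by omega)
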